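-- pv_equiv track=rewrite | github.com/AlexanderRojas0111/Sistema_POS_Odata | app/services/iam_service.py | _matches_wildcard_permission
-- ===== SOURCE A (Python) =====
-- def _matches_wildcard_permission(requested: str, granted: str) -> bool:
--     """Verificar si un permiso coincide con un patrón wildcard"""
--     if '*' not in granted:
--         return requested == granted
--
--     req_parts = requested.split(':')
--     grant_parts = granted.split(':')
--
--     if len(req_parts) != len(grant_parts):
--         return False
--
--     for req_part, grant_part in zip(req_parts, grant_parts):
--         if grant_part != '*' and req_part != grant_part:
--             return False
--
--     return True
-- ===== SOURCE B (Python) =====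
-- def _matches_wildcard_permission(requested: str, granted: str) -> bool:
--     """Recursive matcher over the two segment lists; the no-'*' fast path
--     and the length check of the original fall out of the recursion."""
--     def go(rs, gs):
--         if not rs and not gs:
--             return True
--         if not rs or not gs:
--             return False
--         return (gs[0] == '*' or rs[0] == gs[0]) and go(rs[1:], gs[1:])
--     return go(requested.split(':'), granted.split(':'))
-- ===== Notes on version B (the rewrite author's own statement) =====
-- stated objective: simpler
-- what changed: Replaces A's wildcard pre-check ('*' in granted -> plain string equality) plus explicit zip loop over the split lists with a single recursive matcher on the two segment lists; the exact-equality fast path and the length check both fall out of the recursion.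
import Mathlib
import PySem

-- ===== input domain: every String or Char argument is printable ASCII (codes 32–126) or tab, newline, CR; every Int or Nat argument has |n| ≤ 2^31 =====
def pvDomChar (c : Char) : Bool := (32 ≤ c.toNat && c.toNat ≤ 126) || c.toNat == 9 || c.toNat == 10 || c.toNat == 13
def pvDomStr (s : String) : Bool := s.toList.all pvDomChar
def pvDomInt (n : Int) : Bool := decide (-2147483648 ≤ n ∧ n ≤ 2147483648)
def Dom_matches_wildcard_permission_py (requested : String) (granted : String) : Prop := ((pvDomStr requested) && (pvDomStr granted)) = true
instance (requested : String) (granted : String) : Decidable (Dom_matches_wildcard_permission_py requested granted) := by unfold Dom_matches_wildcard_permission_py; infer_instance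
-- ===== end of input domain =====

-- B replaces A's no-wildcard fast path plus explicit zip loop with one recursive matcher
-- over the two ':'-segment lists (objective: simpler); proved to return the same Bool.


-- ===== PORT A =====
-- the for-loop over zip(req_parts, grant_parts) with its early 'return False'
def pvLoopA : List (String × String) → Bool
  | [] => true
  | (req_part, grant_part) :: rest =>
      if grant_part ≠ "*" ∧ req_part ≠ grant_part then false else pvLoopA rest

def matches_wildcard_permission_py (requested : String) (granted : String) : Bool :=
  if ¬ (PySem.Str.isIn "*" granted = true) then requested == granted
  else
    let req_parts := (PySem.Str.split? requested ":").getD []   -- sep ≠ "" ⇒ split? is always some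
    let grant_parts := (PySem.Str.split? granted ":").getD []
    if req_parts.length ≠ grant_parts.length then false
    else pvLoopA (req_parts.zip grant_parts)

-- ===== PORT B =====
-- Source B's recursive go(rs, gs) on the two segment lists
def pvGoB : List String → List String → Bool
  | [], [] => true
  | [], _ :: _ => false
  | _ :: _, [] => false
  | r :: rs, g :: gs => (g == "*" || r == g) && pvGoB rs gs

def matches_wildcard_permission_py_alt (requested : String) (granted : String) : Bool :=
  pvGoB ((PySem.Str.split? requested ":").getD []) ((PySem.Str.split? granted ":").getD [])

-- ===== PRECONDITION & SPEC =====
def Spec_matches_wildcard_permission_py (requested : String) (granted : String) (out : Bool) : Prop := out = matches_wildcard_permission_py_alt requested granted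
instance (requested : String) (granted : String) (out : Bool) : Decidable (Spec_matches_wildcard_permission_py requested granted out) := by unfold Spec_matches_wildcard_permission_py; infer_instance

-- ===== CLAIM (what is proved, stated in full; the proofs are below) =====
def Claim_equal_matches_wildcard_permission_py : Prop := ∀ (requested : String) (granted : String), Dom_matches_wildcard_permission_py requested granted → Spec_matches_wildcard_permission_py requested granted (matches_wildcard_permission_py requested granted)

-- ===== LEMMAS AND PROOFS =====

-- simple structural model of s.split(':') used only by the proofs
def pvMySplit : List Char → List (List Char)
  | [] => [[]]
  | c :: rest => if c = ':' then [] :: pvMySplit rest else (pvMySplit rest).modifyHead (c :: ·)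

theorem pvMySplit_ne_nil (s : List Char) : pvMySplit s ≠ [] := by
  induction s with
  | nil => simp [pvMySplit]
  | cons c rest ih =>
      simp only [pvMySplit]
      split_ifs
      · simp
      · cases h : pvMySplit rest with
        | nil => exact absurd h ih
        | cons a t => simp [List.modifyHead]

-- go with single-char sep [':'] computes pvMySplit
theorem pvGo_eq (fuel : Nat) (l cur : List Char) (acc : List (List Char))
    (h : l.length < fuel) :
    PySem.Chars.splitOn.go [':'] fuel l cur acc
      = acc.reverse ++ (pvMySplit l).modifyHead (cur.reverse ++ ·) := by
  induction fuel generalizing l cur acc with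
  | zero => omega
  | succ f ih =>
      cases l with
      | nil =>
          simp [PySem.Chars.splitOn.go, pvMySplit, List.modifyHead]
      | cons c rest =>
          by_cases hc : c = ':'
          · subst hc
            have hpre : List.isPrefixOf [':'] (':' :: rest) = true := by
              simp [List.isPrefixOf]
            simp only [PySem.Chars.splitOn.go, hpre, if_pos]
            rw [show List.drop [':'].length (':' :: rest) = rest from rfl]
            rw [ih rest [] (cur.reverse :: acc) (by simpa using Nat.lt_of_succ_lt_succ h)]
            simp [pvMySplit, List.modifyHead]
            cases pvMySplit rest <;> rfl
          · have hpre : List.isPrefixOf [':'] (c :: rest) = false := by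
              simp [List.isPrefixOf]; intro hcc; exact absurd hcc.symm hc
            simp only [PySem.Chars.splitOn.go, hpre]
            rw [if_neg (by simp), ih rest (c :: cur) acc (by simpa using Nat.lt_of_succ_lt_succ h)]
            obtain ⟨a, t, ht⟩ := List.exists_cons_of_ne_nil (pvMySplit_ne_nil rest)
            simp [pvMySplit, hc, ht, List.modifyHead]

theorem pvSplitOn_colon (s : List Char) : PySem.Chars.splitOn s [':'] = pvMySplit s := by
  have h := pvGo_eq (s.length + 1) s [] [] (by omega)
  rw [PySem.Chars.splitOn, h]
  obtain ⟨a, t, ht⟩ := List.exists_cons_of_ne_nil (pvMySplit_ne_nil s)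
  simp [ht, List.modifyHead]

-- joining the pieces with ':' recovers the string
def pvJoinColon : List (List Char) → List Char
  | [] => []
  | [p] => p
  | p :: ps => p ++ ':' :: pvJoinColon ps

theorem pvJoin_mySplit (s : List Char) : pvJoinColon (pvMySplit s) = s := by
  induction s with
  | nil => rfl
  | cons c rest ih =>
      obtain ⟨a, t, ht⟩ := List.exists_cons_of_ne_nil (pvMySplit_ne_nil rest)
      by_cases hc : c = ':'
      · subst hc
        rw [show pvMySplit (':' :: rest) = [] :: pvMySplit rest from by simp [pvMySplit], ht,
          show pvJoinColon ([] :: a :: t) = ':' :: pvJoinColon (a :: t) from rfl, ← ht, ih]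
      · rw [show pvMySplit (c :: rest) = (pvMySplit rest).modifyHead (c :: ·) from by
            simp [pvMySplit, hc], ht, List.modifyHead]
        rw [ht] at ih
        cases t with
        | nil => simpa [pvJoinColon] using congrArg (c :: ·) ih
        | cons b u =>
            rw [show pvJoinColon ((c :: a) :: b :: u) = (c :: a) ++ ':' :: pvJoinColon (b :: u) from rfl]
            rw [show pvJoinColon (a :: b :: u) = a ++ ':' :: pvJoinColon (b :: u) from rfl] at ih
            rw [List.cons_append, ih]

theorem pvMySplit_inj {s t : List Char} (h : pvMySplit s = pvMySplit t) : s = t := by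
  have := pvJoin_mySplit s
  rw [h, pvJoin_mySplit] at this
  exact this.symm

-- every char of every piece is a char of the string
theorem pvMySplit_chars {s : List Char} {p : List Char} (hp : p ∈ pvMySplit s)
    {c : Char} (hc : c ∈ p) : c ∈ s := by
  induction s generalizing p with
  | nil => simp [pvMySplit] at hp; subst hp; simp at hc
  | cons d rest ih =>
      simp only [pvMySplit] at hp
      by_cases hd : d = ':'
      · rw [if_pos hd] at hp
        rcases List.mem_cons.mp hp with h | h
        · subst h; simp at hc
        · exact List.mem_cons_of_mem _ (ih h hc)
      · rw [if_neg hd] at hp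
        obtain ⟨a, t, ht⟩ := List.exists_cons_of_ne_nil (pvMySplit_ne_nil rest)
        rw [ht, List.modifyHead] at hp
        rcases List.mem_cons.mp hp with h | h
        · subst h
          rcases List.mem_cons.mp hc with h2 | h2
          · exact h2 ▸ List.mem_cons_self
          · exact List.mem_cons_of_mem _ (ih (ht ▸ List.mem_cons_self) h2)
        · exact List.mem_cons_of_mem _ (ih (ht ▸ List.mem_cons_of_mem _ h) hc)

-- the two loop shapes agree on equally long lists
theorem pvLoop_eq_go (rs gs : List String) (h : rs.length = gs.length) :
    pvLoopA (rs.zip gs) = pvGoB rs gs := by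
  induction rs generalizing gs with
  | nil => cases gs with
    | nil => rfl
    | cons g gs => simp at h
  | cons r rs ih =>
      cases gs with
      | nil => simp at h
      | cons g gs =>
          simp only [List.zip_cons_cons, pvLoopA, pvGoB]
          by_cases h1 : g ≠ "*" ∧ r ≠ g
          · rw [if_pos h1]
            have : (g == "*" || r == g) = false := by
              simp [h1.1, h1.2]
            simp [this]
          · rw [if_neg h1]
            push Not at h1
            have : (g == "*" || r == g) = true := by
              by_cases hg : g = "*"
              · simp [hg]
              · simp [h1 hg]
            simp [this, ih gs (by simpa using h)]

theorem pvGoB_ne_length {rs gs : List String} (h : rs.length ≠ gs.length) :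
    pvGoB rs gs = false := by
  induction rs generalizing gs with
  | nil => cases gs with
    | nil => simp at h
    | cons g gs => rfl
  | cons r rs ih =>
      cases gs with
      | nil => rfl
      | cons g gs => simp [pvGoB, ih (by simpa using h)]

theorem pvGoB_no_star {rs gs : List String} (h : ∀ g ∈ gs, g ≠ "*") :
    pvGoB rs gs = (rs == gs) := by
  induction rs generalizing gs with
  | nil => cases gs with
    | nil => rfl
    | cons g gs => rfl
  | cons r rs ih =>
      cases gs with
      | nil => rfl
      | cons g gs =>
          have hg : (g == "*") = false := by
            simpa using h g List.mem_cons_self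
          have := ih (fun g' hg' => h g' (List.mem_cons_of_mem _ hg'))
          simp only [pvGoB, hg, Bool.false_or, this]
          by_cases hrg : r = g
          · simp [hrg]
          · have hb : (r == g) = false := by simpa using hrg
            simp [hb]

-- the split used by both ports, in closed form
theorem pvSplit_eq (s : String) :
    (PySem.Str.split? s ":").getD [] = (pvMySplit s.toList).map String.ofList := by
  rw [PySem.Str.split?, show (":" : String).toList = [':'] from rfl,
    show PySem.Chars.split? s.toList [':'] = some (PySem.Chars.splitOn s.toList [':']) from by
      simp [PySem.Chars.split?],
    pvSplitOn_colon]
  rfl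

-- ===== VERDICT (by name: the statement is the Claim_ definition above) =====
theorem matches_wildcard_permission_py_spec : Claim_equal_matches_wildcard_permission_py := by
  intro requested granted _
  unfold Spec_matches_wildcard_permission_py
  unfold matches_wildcard_permission_py matches_wildcard_permission_py_alt
  rw [pvSplit_eq, pvSplit_eq]
  by_cases hstar : PySem.Str.isIn "*" granted = true
  · -- wildcard branch of A: length check + zip loop
    rw [if_neg (by simpa using hstar)]
    by_cases hlen : (pvMySplit requested.toList).length ≠ (pvMySplit granted.toList).length
    · rw [if_pos (by simpa using hlen)]
      rw [pvGoB_ne_length (by simpa using hlen)]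
    · push Not at hlen
      rw [if_neg (by simpa using hlen)]
      exact pvLoop_eq_go _ _ (by simpa using hlen)
  · -- A returns requested == granted; no piece of granted is "*"
    rw [if_pos (by simpa using hstar)]
    have hmem : ('*' : Char) ∉ granted.toList := by
      intro hmem
      apply hstar
      rw [PySem.Str.isIn_iff_infix]
      obtain ⟨l1, l2, hsplit⟩ := List.append_of_mem hmem
      exact ⟨l1, l2, by simp [hsplit]⟩
    have hnostar : ∀ g ∈ (pvMySplit granted.toList).map String.ofList, g ≠ "*" := by
      intro g hg hgeq
      obtain ⟨p, hp, hpe⟩ := List.mem_map.mp hg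
      apply hmem
      apply pvMySplit_chars hp
      have : p = ['*'] := by
        have := congrArg String.toList hpe
        simpa [hgeq] using this
      simp [this]
    rw [pvGoB_no_star hnostar]
    by_cases heq : requested = granted
    · simp [heq]
    · have : (pvMySplit requested.toList).map String.ofList ≠ (pvMySplit granted.toList).map String.ofList := by
        intro h
        apply heq
        have hms : pvMySplit requested.toList = pvMySplit granted.toList := by
          have hinj : Function.Injective (String.ofList) := fun a b hab => by
            simpa using congrArg String.toList hab
          exact List.map_injective_iff.mpr hinj h
        have := pvMySplit_inj hms
        exact String.toList_injective this
      simp [heq, this]
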